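-- pv_equiv track=rewrite | github.com/byzyworks/kasa-controller | main.py | getScopes
-- ===== SOURCE A (Python) =====
-- def getScopes(things):
--     scopes = { }
--
--     # Re-order the things into scopes
--     for thing in things:
--         tags = thing['tags'].split(' ')
--         for tag in tags:
--             if tag not in scopes:
--                 scopes[tag] = [ ]
--             scopes[tag].append(thing['host'])
--
--     # Alphabetically sort the dictionary
--     scopes = dict(sorted(scopes.items()))
--
--     return scopes
-- ===== SOURCE B (Python) =====
-- def getScopes(things):
--     pairs = [(tag, thing['host']) for thing in things for tag in thing['tags'].split(' ')]
--     return {k: [h for t, h in pairs if t == k] for k in sorted({t for t, _ in pairs})}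
-- ===== Notes on version B (the rewrite author's own statement) =====
-- stated objective: simpler
-- what changed: A mutates a dict of lists while looping over things and then sorts its items; B builds a flat (tag, host) pair list in one comprehension and returns {k: hosts filtered per k for k in sorted(set of tags)} with no dict mutation.
-- outside the precondition, e.g. on getScopes([{'host': 'h1'}]): A raises KeyError, B raises KeyError
import Mathlib
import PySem

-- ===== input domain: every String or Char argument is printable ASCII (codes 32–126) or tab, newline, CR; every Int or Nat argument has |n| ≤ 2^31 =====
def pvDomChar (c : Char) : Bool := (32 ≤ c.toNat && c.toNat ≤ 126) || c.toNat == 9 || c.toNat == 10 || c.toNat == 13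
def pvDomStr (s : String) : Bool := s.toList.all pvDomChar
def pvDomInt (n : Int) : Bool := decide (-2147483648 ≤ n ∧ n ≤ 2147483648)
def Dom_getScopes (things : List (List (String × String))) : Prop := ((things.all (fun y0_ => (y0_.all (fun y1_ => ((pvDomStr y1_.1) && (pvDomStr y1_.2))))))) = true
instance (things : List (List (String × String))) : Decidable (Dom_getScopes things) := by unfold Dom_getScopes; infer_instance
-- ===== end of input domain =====

-- B replaces A's mutate-a-dict-then-sort-its-items loop by a flat (tag, host) pair list,
-- a sort of the distinct tags, and a per-tag filter; objective: simpler (no speed claim).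

-- shared helpers: thing['tags'].split(' ') and thing['host'] (both Pythons compute these inline)
def pvTags (thing : List (String × String)) : List String :=
  (PySem.Str.split? (((PySem.Dict.mk thing).get? "tags").getD "") " ").getD []

def pvHost (thing : List (String × String)) : String :=
  ((PySem.Dict.mk thing).get? "host").getD ""

-- ===== PORT A =====
def getScopes (things : List (List (String × String))) : List (String × List String) :=
  let scopes : PySem.Dict String (List String) :=
    things.foldl (fun scopes thing =>
      let tags := pvTags thing
      tags.foldl (fun scopes tag =>
        let scopes := if scopes.contains tag then scopes else scopes.insert tag []
        scopes.modify tag [] (fun l => l ++ [pvHost thing])) scopes)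
      PySem.Dict.empty
  -- dict keys are distinct, so Python's tuple comparison in sorted(scopes.items()) only ever reads the key
  PySem.List.sorted scopes.items (fun p => p.1)

-- ===== PORT B =====
def getScopes_alt (things : List (List (String × String))) : List (String × List String) :=
  let pairs := things.flatMap (fun thing => (pvTags thing).map (fun tag => (tag, pvHost thing)))
  (PySem.List.sorted (PySem.Set.ofList (pairs.map (fun p => p.1))) (fun k => k)).map
    (fun k => (k, (pairs.filter (fun p => p.1 == k)).map (fun p => p.2)))

-- ===== PRECONDITION & SPEC =====
-- Pre_ excludes exactly the inputs where the Python A raises KeyError: a thing missing the 'tags' or 'host' key.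
def Pre_getScopes (things : List (List (String × String))) : Prop :=
  (things.all (fun thing => (PySem.Dict.mk thing).contains "tags" && (PySem.Dict.mk thing).contains "host")) = true
instance (things : List (List (String × String))) : Decidable (Pre_getScopes things) := by unfold Pre_getScopes; infer_instance
def pvWitness_getScopes : (List (List (String × String))) := [[("tags", "a b"), ("host", "h1")], [("tags", "b"), ("host", "h2")]]

def Spec_getScopes (things : List (List (String × String))) (out : List (String × List String)) : Prop := out = getScopes_alt things
instance (things : List (List (String × String))) (out : List (String × List String)) : Decidable (Spec_getScopes things out) := by unfold Spec_getScopes; infer_instance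

-- ===== CLAIM (what is proved, stated in full; the proofs are below) =====
def Claim_equal_getScopes : Prop := ∀ (things : List (List (String × String))), Dom_getScopes things → Pre_getScopes things → Spec_getScopes things (getScopes things)

-- ===== LEMMAS AND PROOFS =====

-- the flat pair list B traverses
def pvPairs (things : List (List (String × String))) : List (String × String) :=
  things.flatMap (fun thing => (pvTags thing).map (fun tag => (tag, pvHost thing)))

-- A's 'if absent: init to []; then append' is one modify with default []
lemma pvBody_eq (d : PySem.Dict String (List String)) (tag v : String) :
    ((if d.contains tag then d else d.insert tag []).modify tag [] (fun l => l ++ [v]))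
      = d.modify tag [] (fun l => l ++ [v]) := by
  by_cases h : d.contains tag = true
  · simp [h]
  · simp only [h, Bool.false_eq_true, if_false]
    rw [PySem.Dict.modify, PySem.Dict.modify, PySem.Dict.getD_insert_self,
        PySem.Dict.insert_insert_self,
        PySem.Dict.getD_of_not_contains _ _ (Bool.eq_false_iff.mpr h)]

-- A's nested loops build exactly the one fold over the flat pair list
lemma pvDict_eq (things : List (List (String × String))) :
    (things.foldl (fun scopes thing =>
        (pvTags thing).foldl (fun scopes tag =>
          scopes.modify tag [] (fun l => l ++ [pvHost thing])) scopes)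
      PySem.Dict.empty)
      = (pvPairs things).foldl (fun d p => d.modify p.1 [] (fun l => l ++ [p.2])) PySem.Dict.empty := by
  rw [pvPairs, List.foldl_flatMap]
  refine PySem.List.foldl_congr_mem _ _ _ _ (fun acc thing _ => ?_)
  rw [List.foldl_map]

theorem getScopes_spec_aux (things : List (List (String × String))) :
    getScopes things = getScopes_alt things := by
  simp only [getScopes, getScopes_alt, pvBody_eq]
  rw [pvDict_eq]
  set d := (pvPairs things).foldl (fun d p => d.modify p.1 [] (fun l => l ++ [p.2])) PySem.Dict.empty with hd
  have hkeys : d.keys = PySem.Set.ofList ((pvPairs things).map (fun p => p.1)) := by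
    rw [hd, PySem.Dict.keys_foldl_modify_key (pvPairs things) (fun p => p.1) []
          (fun _ p => fun l => l ++ [p.2]) PySem.Dict.empty]
    simp [PySem.Dict.keys_empty, PySem.Set.update, PySem.Set.ofList_eq_foldl]
  have hnd : d.keys.Nodup := by
    rw [hkeys]; exact PySem.Set.nodup_ofList _
  have hgetD : ∀ k, d.getD k [] = ((pvPairs things).filter (fun p => p.1 == k)).map (fun p => p.2) := by
    intro k
    rw [hd, PySem.Dict.getD_foldl_modify_append, PySem.Dict.getD_empty, List.nil_append]
  have hitems : d.items = d.keys.map (fun k => (k, d.getD k [])) :=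
    PySem.Dict.items_eq_map_keys d hnd []
  rw [PySem.List.sorted_eq_of_perm_of_pairwise_lt d.items
        ((PySem.List.sorted (PySem.Set.ofList ((pvPairs things).map (fun p => p.1))) (fun k => k)).map
          (fun k => (k, d.getD k []))) (fun p => p.1) ?_ ?_]
  · simp only [pvPairs, hgetD]
  · -- permutation
    rw [hitems, hkeys]
    exact (PySem.List.sorted_perm _ _ _).map _
  · -- strictly increasing keys
    rw [List.pairwise_map]
    exact PySem.List.sorted_ofList_pairwise_lt _

-- ===== VERDICT (by name: the statement is the Claim_ definition above) =====
theorem getScopes_spec : Claim_equal_getScopes := by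
  intro things _ _
  exact getScopes_spec_aux things
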